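-- pv_equiv track=rewrite | github.com/htenlik/P2P-File-Sharing | peer.py | partition_ranges
-- ===== SOURCE A (Python) =====
-- def partition_ranges(total_size: int, k: int):
--     """[start, end] inclusive aralıkları k parçaya böl."""
--     # k sağlayıcıya olabildiğince eşit paylaştır
--     base = total_size // k
--     rem = total_size % k
--     ranges = []
--     start = 0
--     for i in range(k):
--         part = base + (1 if i < rem else 0)
--         end = start + part - 1
--         ranges.append((start, end))
--         start = end + 1
--     return ranges
-- ===== SOURCE B (Python) =====
-- def partition_ranges(total_size: int, k: int):
--     """[start, end] inclusive aralıkları k parçaya böl (closed-form boundaries)."""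
--     base, rem = divmod(total_size, k)
--     return [(i * base + min(i, rem), (i + 1) * base + min(i + 1, rem) - 1)
--             for i in range(k)]
-- ===== Notes on version B (the rewrite author's own statement) =====
-- stated objective: alternative
-- what changed: Replaces A's running-start accumulator loop by a stateless closed-form boundary formula: each range is computed directly from its index i as (i*base+min(i,rem), (i+1)*base+min(i+1,rem)-1).
import Mathlib
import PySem

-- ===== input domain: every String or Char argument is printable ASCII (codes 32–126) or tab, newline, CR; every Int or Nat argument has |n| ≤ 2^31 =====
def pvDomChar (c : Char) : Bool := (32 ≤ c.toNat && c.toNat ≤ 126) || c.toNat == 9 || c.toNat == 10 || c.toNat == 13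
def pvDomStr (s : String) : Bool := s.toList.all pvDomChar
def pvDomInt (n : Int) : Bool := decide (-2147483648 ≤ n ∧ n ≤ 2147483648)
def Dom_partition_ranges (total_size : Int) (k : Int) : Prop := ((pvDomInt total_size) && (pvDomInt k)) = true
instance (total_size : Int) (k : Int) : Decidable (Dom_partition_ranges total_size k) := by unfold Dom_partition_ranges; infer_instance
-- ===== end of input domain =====

-- B replaces A's running-start accumulator with a stateless closed-form boundary formula per index (alternative decomposition, same cost).

-- ===== PORT A =====
-- loop body of A: part = base + (1 if i < rem else 0); end = start + part - 1; append; start = end + 1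
def pvStepA (base rem : Int) (st : List (Int × Int) × Int) (i : Int) : List (Int × Int) × Int :=
  let part := base + (if i < rem then (1 : Int) else 0)
  let e := st.2 + part - 1
  (st.1 ++ [(st.2, e)], e + 1)

def partition_ranges (total_size : Int) (k : Int) : List (Int × Int) :=
  let base := PySem.Int.floordiv total_size k
  let rem := PySem.Int.mod total_size k
  ((PySem.List.pyRange 0 k 1).foldl (pvStepA base rem) ([], 0)).1

-- ===== PORT B =====
def partition_ranges_alt (total_size : Int) (k : Int) : List (Int × Int) :=
  let base := PySem.Int.floordiv total_size k
  let rem := PySem.Int.mod total_size k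
  (PySem.List.pyRange 0 k 1).map
    (fun i => (i * base + min i rem, (i + 1) * base + min (i + 1) rem - 1))

-- ===== PRECONDITION & SPEC =====
-- Pre_ excludes k = 0, on which Python A raises ZeroDivisionError (B raises too).
def Pre_partition_ranges (total_size : Int) (k : Int) : Prop := k ≠ 0
instance (total_size : Int) (k : Int) : Decidable (Pre_partition_ranges total_size k) := by unfold Pre_partition_ranges; infer_instance
def pvWitness_partition_ranges : Int × Int := (10, 3)

def Spec_partition_ranges (total_size : Int) (k : Int) (out : List (Int × Int)) : Prop := out = partition_ranges_alt total_size k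
instance (total_size : Int) (k : Int) (out : List (Int × Int)) : Decidable (Spec_partition_ranges total_size k out) := by unfold Spec_partition_ranges; infer_instance

-- ===== CLAIM (what is proved, stated in full; the proofs are below) =====
def Claim_equal_partition_ranges : Prop := ∀ (total_size : Int) (k : Int), Dom_partition_ranges total_size k → Pre_partition_ranges total_size k → Spec_partition_ranges total_size k (partition_ranges total_size k)

-- ===== LEMMAS AND PROOFS =====

-- Invariant: after folding A's loop over indices 0..n-1, the accumulator is the
-- closed-form list and the running start equals n*base + min n rem (needs 0 ≤ rem).
theorem pv_fold_invariant (base rem : Int) (hrem : 0 ≤ rem) (n : ℕ) :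
    ((List.range n).map (fun j : ℕ => (j : Int))).foldl (pvStepA base rem) ([], 0)
    = ((List.range n).map
        (fun j : ℕ => ((j : Int) * base + min (j : Int) rem,
                   ((j : Int) + 1) * base + min ((j : Int) + 1) rem - 1)),
       (n : Int) * base + min (n : Int) rem) := by
  induction n with
  | zero => simp [min_eq_left hrem]
  | succ m ih =>
      rw [List.range_succ, List.map_append, List.foldl_append, ih, List.map_append]
      simp only [List.map_cons, List.map_nil, List.foldl_cons, List.foldl_nil, pvStepA,
        Prod.mk.injEq, List.append_cancel_left_eq, List.cons.injEq, and_true]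
      push_cast
      rcases lt_or_ge (m : Int) rem with h | h
      · have h1 : min (m : Int) rem = (m : Int) := by omega
        have h2 : min ((m : Int) + 1) rem = (m : Int) + 1 := by omega
        rw [if_pos h, h1, h2]
        exact ⟨⟨trivial, by ring⟩, by ring⟩
      · have h1 : min (m : Int) rem = rem := by omega
        have h2 : min ((m : Int) + 1) rem = rem := by omega
        rw [if_neg (by omega), h1, h2]
        exact ⟨⟨trivial, by ring⟩, by ring⟩

-- ===== VERDICT (by name: the statement is the Claim_ definition above) =====
theorem partition_ranges_spec : Claim_equal_partition_ranges := by
  intro t k _ hk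
  unfold Spec_partition_ranges partition_ranges partition_ranges_alt
  rcases lt_or_gt_of_ne hk with hneg | hpos
  · have h : PySem.List.pyRange 0 k 1 = [] := by
      rw [PySem.List.pyRange_one]
      simp
      omega
    simp [h]
  · have hrem : 0 ≤ PySem.Int.mod t k := PySem.Int.mod_nonneg t hpos
    rw [PySem.List.pyRange_one]
    simp only [zero_add]
    rw [pv_fold_invariant _ _ hrem, List.map_map]
    simp [Function.comp]
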